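-- pv_equiv track=rewrite | github.com/panyiwei-home/Freedeck | py_modules/tianyi_service.py | _is_capture_redirect_loop
-- ===== SOURCE A (Python) =====
-- from typing import Any, Dict, List, Optional, Sequence, Tuple
--
-- CAPTURE_LOOP_WINDOW = 8
--
-- CAPTURE_LOOP_CORE_HOSTS = ("cloud.189.cn", "h5.cloud.189.cn")
--
-- def _is_capture_redirect_loop(host_history: List[str]) -> bool:
--     """判断是否命中 cloud/h5 互跳。"""
--     if len(host_history) < CAPTURE_LOOP_WINDOW:
--         return False
--
--     tail = host_history[-CAPTURE_LOOP_WINDOW:]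
--     if any(host not in CAPTURE_LOOP_CORE_HOSTS for host in tail):
--         return False
--     if len(set(tail)) != 2:
--         return False
--     for idx in range(1, len(tail)):
--         if tail[idx] == tail[idx - 1]:
--             return False
--     return True
-- ===== SOURCE B (Python) =====
-- from typing import List
--
-- CAPTURE_LOOP_WINDOW = 8
--
-- CAPTURE_LOOP_CORE_HOSTS = ("cloud.189.cn", "h5.cloud.189.cn")
--
-- def _is_capture_redirect_loop(host_history: List[str]) -> bool:
--     """Hit iff the last 8 hosts are exactly one of the two alternating cloud/h5 patterns."""
--     a, b = CAPTURE_LOOP_CORE_HOSTS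
--     half = CAPTURE_LOOP_WINDOW // 2
--     pattern_ab = [a, b] * half
--     pattern_ba = [b, a] * half
--     tail = host_history[-CAPTURE_LOOP_WINDOW:]
--     return tail == pattern_ab or tail == pattern_ba
-- ===== Notes on version B (the rewrite author's own statement) =====
-- stated objective: simpler
-- what changed: Replaces A's three validation passes over the tail (membership scan, set-cardinality check, adjacent-equality index loop) with a single equality comparison of the last 8 hosts against the two precomputed alternating patterns.
import Mathlib
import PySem

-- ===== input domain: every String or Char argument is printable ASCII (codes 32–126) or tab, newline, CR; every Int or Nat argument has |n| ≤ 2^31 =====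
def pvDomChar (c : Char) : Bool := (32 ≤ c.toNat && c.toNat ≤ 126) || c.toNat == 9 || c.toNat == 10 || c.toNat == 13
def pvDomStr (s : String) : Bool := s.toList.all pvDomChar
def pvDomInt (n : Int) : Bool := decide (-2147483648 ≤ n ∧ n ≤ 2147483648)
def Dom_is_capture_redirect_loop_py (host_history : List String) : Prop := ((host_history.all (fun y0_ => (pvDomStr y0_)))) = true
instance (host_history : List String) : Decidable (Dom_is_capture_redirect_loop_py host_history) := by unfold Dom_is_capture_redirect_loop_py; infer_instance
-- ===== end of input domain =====

-- B replaces A's three validation passes over the 8-host tail (membership scan,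
-- set-size check, adjacency loop) with one equality comparison of the tail against
-- the two precomputed alternating patterns (objective: simpler).

-- ===== PORT A =====
def is_capture_redirect_loop_py (host_history : List String) : Bool :=
  if host_history.length < 8 then false
  else
    let tail := PySem.List.slice host_history (some (-8)) none
    if tail.any (fun host => !(host == "cloud.189.cn" || host == "h5.cloud.189.cn")) then false
    else if (PySem.Set.ofList tail).length ≠ 2 then false
    else if (PySem.List.pyRange 1 tail.length 1).any
        (fun idx => ((PySem.List.pyGet? tail idx).getD "") == ((PySem.List.pyGet? tail (idx - 1)).getD ""))
      then false
    else true

-- ===== PORT B =====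
def is_capture_redirect_loop_py_alt (host_history : List String) : Bool :=
  let a := "cloud.189.cn"
  let b := "h5.cloud.189.cn"
  let pattern_ab := (List.replicate 4 [a, b]).flatten   -- [a, b] * 4
  let pattern_ba := (List.replicate 4 [b, a]).flatten   -- [b, a] * 4
  let tail := PySem.List.slice host_history (some (-8)) none
  tail == pattern_ab || tail == pattern_ba

-- ===== PRECONDITION & SPEC =====
def Spec_is_capture_redirect_loop_py (host_history : List String) (out : Bool) : Prop := out = is_capture_redirect_loop_py_alt host_history
instance (host_history : List String) (out : Bool) : Decidable (Spec_is_capture_redirect_loop_py host_history out) := by unfold Spec_is_capture_redirect_loop_py; infer_instance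

-- ===== CLAIM (what is proved, stated in full; the proofs are below) =====
def Claim_equal_is_capture_redirect_loop_py : Prop := ∀ (host_history : List String), Dom_is_capture_redirect_loop_py host_history → Spec_is_capture_redirect_loop_py host_history (is_capture_redirect_loop_py host_history)

-- ===== LEMMAS AND PROOFS =====

-- On any 8-element tail, A's three checks coincide with B's comparison against the
-- two alternating patterns: if some element is outside the two core hosts both sides
-- are false; otherwise every element is one of the two literal hosts and the 256
-- remaining cases are closed by `decide`.
lemma tail8_core (t : List String) (ht : t.length = 8) :
    (if t.any (fun host => !(host == "cloud.189.cn" || host == "h5.cloud.189.cn")) then false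
     else if (PySem.Set.ofList t).length ≠ 2 then false
     else if (PySem.List.pyRange 1 t.length 1).any
        (fun idx => ((PySem.List.pyGet? t idx).getD "") == ((PySem.List.pyGet? t (idx - 1)).getD ""))
      then false
     else true)
    = ((t == (List.replicate 4 ["cloud.189.cn", "h5.cloud.189.cn"]).flatten)
       || (t == (List.replicate 4 ["h5.cloud.189.cn", "cloud.189.cn"]).flatten)) := by
  by_cases hall : ∀ x ∈ t, x = "cloud.189.cn" ∨ x = "h5.cloud.189.cn"
  · obtain ⟨x1,x2,x3,x4,x5,x6,x7,x8, rfl⟩ :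
        ∃ a b c d e f g h', t = [a,b,c,d,e,f,g,h'] := by
      match t, ht with | [a,b,c,d,e,f,g,h'], _ => exact ⟨_,_,_,_,_,_,_,_,rfl⟩
    rcases hall x1 (by simp) with rfl|rfl <;>
    rcases hall x2 (by simp) with rfl|rfl <;>
    rcases hall x3 (by simp) with rfl|rfl <;>
    rcases hall x4 (by simp) with rfl|rfl <;>
    rcases hall x5 (by simp) with rfl|rfl <;>
    rcases hall x6 (by simp) with rfl|rfl <;>
    rcases hall x7 (by simp) with rfl|rfl <;>
    rcases hall x8 (by simp) with rfl|rfl <;>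
    decide
  · push Not at hall
    obtain ⟨x, hx, hxa, hxb⟩ := hall
    have hany : t.any (fun host => !(host == "cloud.189.cn" || host == "h5.cloud.189.cn")) = true := by
      rw [List.any_eq_true]
      exact ⟨x, hx, by simp [hxa, hxb]⟩
    rw [if_pos hany]
    have h1 : (t == (List.replicate 4 ["cloud.189.cn", "h5.cloud.189.cn"]).flatten) = false := by
      rw [beq_eq_false_iff_ne]
      rintro rfl
      simp at hx
      rcases hx with h|h|h|h|h|h|h|h <;> first | exact hxa h | exact hxb h
    have h2 : (t == (List.replicate 4 ["h5.cloud.189.cn", "cloud.189.cn"]).flatten) = false := by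
      rw [beq_eq_false_iff_ne]
      rintro rfl
      simp at hx
      rcases hx with h|h|h|h|h|h|h|h <;> first | exact hxa h | exact hxb h
    rw [h1, h2]
    rfl

-- ===== VERDICT (by name: the statement is the Claim_ definition above) =====
theorem is_capture_redirect_loop_py_spec : Claim_equal_is_capture_redirect_loop_py := by
  intro h _
  unfold Spec_is_capture_redirect_loop_py
  simp only [is_capture_redirect_loop_py, is_capture_redirect_loop_py_alt]
  rw [PySem.List.slice_from_neg_ofNat h 8 (by norm_num)]
  by_cases hlen : h.length < 8
  · rw [if_pos hlen]
    have h0 : h.length - 8 = 0 := by omega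
    rw [h0, List.drop_zero]
    have hne : ∀ p : List String, p.length = 8 → (h == p) = false := by
      intro p hp
      rw [beq_eq_false_iff_ne]
      intro e
      have := congrArg List.length e
      omega
    rw [hne _ (by decide), hne _ (by decide)]
    rfl
  · rw [if_neg hlen]
    have ht : (h.drop (h.length - 8)).length = 8 := by
      rw [List.length_drop]; omega
    exact tail8_core _ ht
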